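-- pv_equiv track=rewrite | github.com/FUYOH666/Plague-InGG | seed/loop.py | _detect_stuck
-- ===== SOURCE A (Python) =====
-- def _detect_stuck(tools_used: list[str], tool_read_paths: list[str]) -> bool:
--     """Detect if agent is spinning: same read_file path 2+ times, or same tool 3+ in a row."""
--     if len(tool_read_paths) != len(set(tool_read_paths)):
--         return True  # duplicate read paths
--     if len(tools_used) >= 3:
--         for i in range(len(tools_used) - 2):
--             if tools_used[i] == tools_used[i + 1] == tools_used[i + 2]:
--                 return True
--     return False
-- ===== SOURCE B (Python) =====
-- def _detect_stuck(tools_used: list[str], tool_read_paths: list[str]) -> bool: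
--     """Detect if agent is spinning: same read_file path 2+ times, or same tool 3+ in a row."""
--     if len(tool_read_paths) != len(set(tool_read_paths)):
--         return True  # duplicate read paths
--     run, prev = 0, None
--     for t in tools_used:
--         run = run + 1 if t == prev else 1
--         prev = t
--         if run >= 3:
--             return True
--     return False
-- ===== Notes on version B (the rewrite author's own statement) =====
-- stated objective: simpler
-- what changed: Replaced the length-guarded triple index scan tools_used[i]==tools_used[i+1]==tools_used[i+2] by a single run-length pass that tracks the previous tool and the current run counter, returning True when a run reaches 3.
import Mathlib
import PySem

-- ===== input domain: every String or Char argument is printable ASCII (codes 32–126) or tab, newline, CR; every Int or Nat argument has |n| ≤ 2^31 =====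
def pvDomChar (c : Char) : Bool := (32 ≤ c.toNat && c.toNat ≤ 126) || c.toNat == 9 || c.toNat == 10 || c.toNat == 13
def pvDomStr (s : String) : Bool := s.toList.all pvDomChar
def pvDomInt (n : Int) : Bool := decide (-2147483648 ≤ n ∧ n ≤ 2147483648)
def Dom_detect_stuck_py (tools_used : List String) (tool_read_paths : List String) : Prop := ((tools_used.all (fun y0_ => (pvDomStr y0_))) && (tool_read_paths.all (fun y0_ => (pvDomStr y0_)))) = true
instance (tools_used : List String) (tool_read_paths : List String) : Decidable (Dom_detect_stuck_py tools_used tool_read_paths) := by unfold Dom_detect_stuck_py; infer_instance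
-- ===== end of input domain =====

-- B replaces A's guarded i/i+1/i+2 index scan by a single run-length pass (current tool + run counter); same cost, simpler (no length guard, no indexing).

-- ===== PORT A =====
def detect_stuck_py (tools_used : List String) (tool_read_paths : List String) : Bool :=
  if tool_read_paths.length ≠ (PySem.Set.ofList tool_read_paths).length then true
  else if tools_used.length ≥ 3 then
    (PySem.List.pyRange 0 ((tools_used.length : Int) - 2) 1).any (fun i =>
      (PySem.List.pyGet? tools_used i == PySem.List.pyGet? tools_used (i + 1)) &&
      (PySem.List.pyGet? tools_used (i + 1) == PySem.List.pyGet? tools_used (i + 2)))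
  else false

-- ===== PORT B =====
def detect_stuck_py_alt (tools_used : List String) (tool_read_paths : List String) : Bool :=
  if tool_read_paths.length ≠ (PySem.Set.ofList tool_read_paths).length then true
  else
    (tools_used.foldl
      (fun (st : Nat × Option String × Bool) t =>
        let run := if some t == st.2.1 then st.1 + 1 else 1
        (run, some t, st.2.2 || decide (run ≥ 3)))
      (0, none, false)).2.2

-- ===== PRECONDITION & SPEC =====
def Spec_detect_stuck_py (tools_used : List String) (tool_read_paths : List String) (out : Bool) : Prop := out = detect_stuck_py_alt tools_used tool_read_paths
instance (tools_used : List String) (tool_read_paths : List String) (out : Bool) : Decidable (Spec_detect_stuck_py tools_used tool_read_paths out) := by unfold Spec_detect_stuck_py; infer_instance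

-- ===== CLAIM (what is proved, stated in full; the proofs are below) =====
def Claim_equal_detect_stuck_py : Prop := ∀ (tools_used : List String) (tool_read_paths : List String), Dom_detect_stuck_py tools_used tool_read_paths → Spec_detect_stuck_py tools_used tool_read_paths (detect_stuck_py tools_used tool_read_paths)

-- ===== LEMMAS AND PROOFS =====

/-- The common reference function: is there a run of three equal adjacent elements? -/
def pvHasTriple : List String → Bool
  | a :: b :: c :: rest => ((a == b) && (b == c)) || pvHasTriple (b :: c :: rest)
  | _ => false

/-- B's scan after the first element: previous element `p`, current run length `run`. -/
lemma pvHasTriple_one (a : String) : pvHasTriple [a] = false := rfl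
lemma pvHasTriple_two (a b : String) : pvHasTriple [a, b] = false := rfl
lemma pvHasTriple_cons (a b c : String) (rest : List String) :
    pvHasTriple (a :: b :: c :: rest) = (((a == b) && (b == c)) || pvHasTriple (b :: c :: rest)) := rfl

def pvFrom (p : String) (run : Nat) : List String → Bool
  | [] => false
  | t :: ts =>
    let r := if t == p then run + 1 else 1
    decide (r ≥ 3) || pvFrom t r ts

lemma pvFrom_nil (p : String) (run : Nat) : pvFrom p run [] = false := rfl
lemma pvFrom_cons (p : String) (run : Nat) (t : String) (ts : List String) :
    pvFrom p run (t :: ts) =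
      (decide ((if t == p then run + 1 else 1) ≥ 3) || pvFrom t (if t == p then run + 1 else 1) ts) := rfl

lemma pvFold_eq_pvFrom (l : List String) : ∀ (p : String) (run : Nat) (found : Bool),
    (l.foldl
      (fun (st : Nat × Option String × Bool) t =>
        let run := if some t == st.2.1 then st.1 + 1 else 1
        (run, some t, st.2.2 || decide (run ≥ 3)))
      (run, some p, found)).2.2 = (found || pvFrom p run l) := by
  induction l with
  | nil => simp [pvFrom_nil]
  | cons t ts ih =>
    intro p run found
    simp only [List.foldl_cons, pvFrom, ih]
    by_cases h : t = p
    · subst h; simp [Bool.or_assoc]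
    · have hb : (t == p) = false := by simp [h]
      have hb' : ((some t : Option String) == some p) = false := by simp [h]
      simp [hb, hb']

lemma pvFrom_eq_pvHasTriple (l : List String) :
    (∀ b : String, pvFrom b 1 l = pvHasTriple (b :: l)) ∧
    (∀ a b : String, a = b → pvFrom b 2 l = pvHasTriple (a :: b :: l)) := by
  induction l with
  | nil =>
    constructor
    · intro b; simp [pvFrom, pvHasTriple]
    · intro a b _; simp [pvFrom, pvHasTriple]
  | cons c r ih =>
    constructor
    · intro b
      by_cases h : c = b
      · subst h
        simp only [pvFrom_cons, beq_self_eq_true, if_true]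
        have := ih.2 c c rfl
        simp [this]
      · have hb : (c == b) = false := by simp [h]
        simp only [pvFrom_cons, hb, Bool.false_eq_true, if_false]
        have := ih.1 c
        simp only [this]
        have h' : ¬ b = c := fun h1 => h h1.symm
        cases r with
        | nil => simp [pvHasTriple_one, pvHasTriple_two]
        | cons d r' => simp [pvHasTriple_cons, h']
    · intro a b hab; subst hab
      by_cases h : c = a
      · subst h
        simp [pvFrom_cons, pvHasTriple_cons]
      · have hb : (c == a) = false := by simp [h]
        simp only [pvFrom_cons, hb, Bool.false_eq_true, if_false]
        have := ih.1 c
        simp only [this]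
        have h' : (a == c) = false := by simp; exact fun h1 => h h1.symm
        cases r with
        | nil => simp [pvHasTriple_one, pvHasTriple_two, pvHasTriple_cons, h']
        | cons d r' => simp [pvHasTriple_cons, h']

/-- B's body (second branch) equals pvHasTriple. -/
lemma pvAlt_eq_pvHasTriple (l : List String) :
    (l.foldl
      (fun (st : Nat × Option String × Bool) t =>
        let run := if some t == st.2.1 then st.1 + 1 else 1
        (run, some t, st.2.2 || decide (run ≥ 3)))
      (0, none, false)).2.2 = pvHasTriple l := by
  cases l with
  | nil => simp [pvHasTriple]
  | cons t ts =>
    have h1 : ((some t : Option String) == none) = false := by simp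
    simp only [List.foldl_cons, h1, Bool.false_eq_true, if_false]
    rw [pvFold_eq_pvFrom]
    simp [(pvFrom_eq_pvHasTriple ts).1 t]

/-- A's index scan (over List.range) equals pvHasTriple. -/
lemma pvIdx_eq_pvHasTriple (l : List String) :
    (List.range (l.length - 2)).any (fun i =>
      (l[i]? == l[i + 1]?) && (l[i + 1]? == l[i + 2]?)) = pvHasTriple l := by
  match l with
  | [] => simp [pvHasTriple]
  | [a] => simp [pvHasTriple]
  | [a, b] => simp [pvHasTriple]
  | a :: b :: c :: rest =>
    have hlen : (a :: b :: c :: rest).length - 2 = rest.length + 1 := by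
      simp [List.length_cons]
    rw [hlen, List.range_succ_eq_map, List.any_cons, List.any_map]
    have ih := pvIdx_eq_pvHasTriple (b :: c :: rest)
    have hlen2 : (b :: c :: rest).length - 2 = rest.length := by
      simp [List.length_cons]
    rw [hlen2] at ih
    have hshift : ((List.range rest.length).any
        (((fun i => ((a :: b :: c :: rest)[i]? == (a :: b :: c :: rest)[i + 1]?) &&
           ((a :: b :: c :: rest)[i + 1]? == (a :: b :: c :: rest)[i + 2]?))) ∘ Nat.succ)) =
        ((List.range rest.length).any (fun i =>
          ((b :: c :: rest)[i]? == (b :: c :: rest)[i + 1]?) &&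
          ((b :: c :: rest)[i + 1]? == (b :: c :: rest)[i + 2]?))) := by
      rfl
    rw [hshift, ih]
    simp [pvHasTriple_cons]

lemma pvA_eq_pvHasTriple (l : List String) :
    (if l.length ≥ 3 then
      (PySem.List.pyRange 0 ((l.length : Int) - 2) 1).any (fun i =>
        (PySem.List.pyGet? l i == PySem.List.pyGet? l (i + 1)) &&
        (PySem.List.pyGet? l (i + 1) == PySem.List.pyGet? l (i + 2)))
    else false) = pvHasTriple l := by
  by_cases h : l.length ≥ 3
  · simp only [h, if_true]
    rw [show ((l.length : Int) - 2) = ((l.length - 2 : Nat) : Int) by omega]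
    rw [PySem.List.pyRange_zero_natCast, List.any_map]
    rw [← pvIdx_eq_pvHasTriple l]
    congr 1
    funext i
    simp only [Function.comp]
    have e1 : PySem.List.pyGet? l (i : Int) = l[i]? := PySem.List.pyGet?_natCast l i
    have e2 : PySem.List.pyGet? l ((i : Int) + 1) = l[i + 1]? := by
      rw [show ((i : Int) + 1) = ((i + 1 : Nat) : Int) by push_cast; ring]
      exact PySem.List.pyGet?_natCast l (i + 1)
    have e3 : PySem.List.pyGet? l ((i : Int) + 2) = l[i + 2]? := by
      rw [show ((i : Int) + 2) = ((i + 2 : Nat) : Int) by push_cast; ring]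
      exact PySem.List.pyGet?_natCast l (i + 2)
    rw [e1, e2, e3]
  · simp only [h, if_false]
    match l, h with
    | [], _ => simp [pvHasTriple]
    | [a], _ => simp [pvHasTriple]
    | [a, b], _ => simp [pvHasTriple]
    | a :: b :: c :: rest, h => exact absurd (by simp) h

-- ===== VERDICT (by name: the statement is the Claim_ definition above) =====
theorem detect_stuck_py_spec : Claim_equal_detect_stuck_py := by
  intro tools_used tool_read_paths _
  unfold Spec_detect_stuck_py detect_stuck_py detect_stuck_py_alt
  by_cases hdup : tool_read_paths.length ≠ (PySem.Set.ofList tool_read_paths).length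
  · simp [hdup]
  · simp only [hdup, if_false]
    rw [pvAlt_eq_pvHasTriple, ← pvA_eq_pvHasTriple]
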